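-- pv_equiv track=rewrite | github.com/Exaecut/vekl | gen_swizzle.py | swizzles
-- ===== SOURCE A (Python) =====
-- from itertools import product
--
-- def swizzles(rank, components):
--     """Generate all rank-length swizzles from [(name, index), ...]."""
--     results = []
--     for combo in product(components, repeat=rank):
--         name = "".join(c[0] for c in combo)
--         indices = [c[1] for c in combo]
--         padded = indices + [0] * (4 - rank)
--         results.append((name, padded))
--     return results
-- ===== SOURCE B (Python) =====
-- def swizzles(rank, components):
--     """Generate all rank-length swizzles from [(name, index), ...].
--
--     Unranking approach: the m-th swizzle (0 <= m < k**rank) is decoded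
--     directly from m's base-k digits (most significant digit = first
--     position), so no cartesian product is ever materialised or expanded.
--     """
--     k = len(components)
--     pad = [0] * (4 - rank)
--     results = []
--     for m in range(k ** rank):
--         combo = [components[m // k ** (rank - 1 - pos) % k] for pos in range(rank)]
--         results.append(("".join(c[0] for c in combo), [c[1] for c in combo] + pad))
--     return results
-- ===== Notes on version B (the rewrite author's own statement) =====
-- stated objective: alternative
-- what changed: Replaces itertools.product enumeration with arithmetic unranking: each result index m in range(k**rank) is decoded into its combination via base-k digit extraction (m // k**(rank-1-pos) % k), so no product stream or partial-result expansion exists.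
import Mathlib
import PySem

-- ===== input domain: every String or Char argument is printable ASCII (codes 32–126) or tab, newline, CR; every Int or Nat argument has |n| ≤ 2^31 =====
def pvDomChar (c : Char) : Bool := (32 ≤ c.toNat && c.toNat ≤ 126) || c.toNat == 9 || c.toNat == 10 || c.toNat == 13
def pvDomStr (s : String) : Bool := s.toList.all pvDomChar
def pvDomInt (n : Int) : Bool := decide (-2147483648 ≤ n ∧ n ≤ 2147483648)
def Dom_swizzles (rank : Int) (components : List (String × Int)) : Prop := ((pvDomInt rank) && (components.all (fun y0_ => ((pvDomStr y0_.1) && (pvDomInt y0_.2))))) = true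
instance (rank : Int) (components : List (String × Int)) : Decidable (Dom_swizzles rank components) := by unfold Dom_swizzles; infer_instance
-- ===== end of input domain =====

-- B replaces itertools.product with arithmetic unranking: the m-th result is
-- decoded from m's base-k digits (objective: alternative algorithm, same cost).


-- ===== PORT A =====
-- itertools.product(components, repeat=n): first position varies slowest
def pyProductRep (components : List (String × Int)) : Nat → List (List (String × Int))
  | 0 => [[]]
  | n + 1 => components.flatMap (fun c => (pyProductRep components n).map (fun t => c :: t))

def swizzles (rank : Int) (components : List (String × Int)) : List (String × List Int) :=
  (pyProductRep components rank.toNat).foldl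
    (fun results combo =>
      results ++ [(PySem.Str.join "" (combo.map Prod.fst),
                   combo.map Prod.snd ++ List.replicate (4 - rank).toNat 0)])
    []

-- ===== PORT B =====
-- components[d]: d = m // k**(rank-1-pos) % k is always a valid index (0 ≤ d < k),
-- so the .getD default is never used; for 0 ≤ rank the Python Int arithmetic
-- m // k**(rank-1-pos) % k is exactly this Nat arithmetic.
def swizzles_alt (rank : Int) (components : List (String × Int)) : List (String × List Int) :=
  let k := components.length
  let r := rank.toNat
  let pad := List.replicate (4 - rank).toNat 0
  (List.range (k ^ r)).foldl
    (fun results m =>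
      let combo := (List.range r).map (fun pos =>
        (PySem.List.pyGet? components ((m / k ^ (r - 1 - pos) % k : Nat) : Int)).getD ("", 0))
      results ++ [(PySem.Str.join "" (combo.map Prod.fst), combo.map Prod.snd ++ pad)])
    []

-- ===== PRECONDITION & SPEC =====
-- Pre_ excludes only rank < 0, on which A raises ValueError (product's repeat must be non-negative).
def Pre_swizzles (rank : Int) (components : List (String × Int)) : Prop := 0 ≤ rank
instance (rank : Int) (components : List (String × Int)) : Decidable (Pre_swizzles rank components) := by unfold Pre_swizzles; infer_instance

def pvWitness_swizzles : Int × (List (String × Int)) := (2, [("x", 1), ("y", 2)])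

def Spec_swizzles (rank : Int) (components : List (String × Int)) (out : List (String × List Int)) : Prop := out = swizzles_alt rank components
instance (rank : Int) (components : List (String × Int)) (out : List (String × List Int)) : Decidable (Spec_swizzles rank components out) := by unfold Spec_swizzles; infer_instance

-- ===== CLAIM (what is proved, stated in full; the proofs are below) =====
def Claim_equal_swizzles : Prop := ∀ (rank : Int) (components : List (String × Int)), Dom_swizzles rank components → Pre_swizzles rank components → Spec_swizzles rank components (swizzles rank components)

-- ===== LEMMAS AND PROOFS =====

-- B's digit decoder for index m (most significant digit first)
def decodeCombo (components : List (String × Int)) (r m : Nat) : List (String × Int) :=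
  (List.range r).map (fun pos =>
    (PySem.List.pyGet? components ((m / components.length ^ (r - 1 - pos) % components.length : Nat) : Int)).getD ("", 0))

-- enumerating a list = enumerating its indices
lemma flatMap_range_getD {α β : Type} (L : List α) (d : α) (f : α → List β) :
    L.flatMap f = (List.range L.length).flatMap (fun i => f (L.getD i d)) := by
  induction L with
  | nil => simp
  | cons a L ih =>
    simp only [List.length_cons, List.range_succ_eq_map, List.flatMap_cons, List.flatMap_map]
    simpa using congrArg (List.append (f a)) ih

-- range (a*t) split into a blocks of t
lemma range_mul_flatMap (a t : Nat) :
    List.range (a * t) = (List.range a).flatMap (fun i => (List.range t).map (fun m => i * t + m)) := by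
  induction a with
  | zero => simp
  | succ a ih =>
    rw [Nat.succ_mul, List.range_add, ih, List.range_succ, List.flatMap_append]
    simp [Nat.add_comm]

-- decoding i*k^n + m' peels off the most significant digit
lemma decodeCombo_succ (components : List (String × Int)) (n i m' : Nat)
    (hi : i < components.length) (hm : m' < components.length ^ n) :
    decodeCombo components (n + 1) (i * components.length ^ n + m')
      = (PySem.List.pyGet? components (i : Int)).getD ("", 0) :: decodeCombo components n m' := by
  have hk0 : 0 < components.length := Nat.lt_of_le_of_lt (Nat.zero_le i) hi
  simp only [decodeCombo, List.range_succ_eq_map, List.map_cons, List.map_map]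
  congr 1
  · -- digit 0: (i*k^n+m') / k^n % k = i
    have e0 : n + 1 - 1 - 0 = n := by omega
    have h1 : (i * components.length ^ n + m') / components.length ^ n = i := by
      rw [Nat.add_comm, mul_comm, Nat.add_mul_div_left _ _ (pow_pos hk0 n),
        Nat.div_eq_of_lt hm, Nat.zero_add]
    rw [e0, h1, Nat.mod_eq_of_lt hi]
  · -- digits 1..n: the high part contributes a multiple of k
    refine List.map_congr_left fun pos hpos => ?_
    have hpos' : pos < n := List.mem_range.mp hpos
    simp only [Function.comp_def]
    have hj : n + 1 - 1 - (pos + 1) = n - 1 - pos := by omega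
    rw [hj]
    set j := n - 1 - pos with hjdef
    have hpow : components.length ^ (n - j - 1) * components.length * components.length ^ j
        = components.length ^ n := by
      rw [← pow_succ, ← pow_add]; congr 1; omega
    have key : (i * components.length ^ n + m') / components.length ^ j % components.length
        = m' / components.length ^ j % components.length := by
      rw [← hpow, ← mul_assoc, Nat.add_comm, Nat.add_mul_div_right _ _ (pow_pos hk0 j),
        ← mul_assoc, Nat.add_mul_mod_self_right]
    rw [key]

-- the decoded combinations, in order, are exactly itertools.product's stream
lemma decode_eq_product (components : List (String × Int)) (n : Nat) :
    (List.range (components.length ^ n)).map (decodeCombo components n)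
      = pyProductRep components n := by
  induction n with
  | zero => simp [decodeCombo, pyProductRep]
  | succ n ih =>
    rw [pyProductRep, pow_succ, Nat.mul_comm, range_mul_flatMap, List.map_flatMap,
      flatMap_range_getD components ("", 0)]
    refine List.flatMap_congr (fun i hi => ?_)
    have hi' : i < components.length := List.mem_range.mp hi
    rw [← ih, List.map_map, List.map_map]
    refine List.map_congr_left (fun m' hm' => ?_)
    have hm2 : m' < components.length ^ n := List.mem_range.mp hm'
    show decodeCombo components (n + 1) (i * components.length ^ n + m')
      = components.getD i ("", 0) :: decodeCombo components n m'
    rw [decodeCombo_succ components n i m' hi' hm2]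
    congr 1
    rw [PySem.List.pyGet?_natCast]
    simp [List.getElem?_eq_getElem hi', List.getD_eq_getElem?_getD]

-- ===== VERDICT (by name: the statement is the Claim_ definition above) =====
theorem swizzles_spec : Claim_equal_swizzles := by
  intro rank components _ _
  show _ = _
  rw [swizzles, swizzles_alt]
  simp only [PySem.List.foldl_append_singleton_eq_map, ← decode_eq_product, List.map_map]
  refine congrArg _ (List.map_congr_left fun m _ => ?_)
  simp [decodeCombo, Function.comp_def, List.map_map]
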